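-- pv_equiv track=rewrite | github.com/emaurel/TIPE | glouton.py | InUnion
-- ===== SOURCE A (Python) =====
-- def pointIn(p, a) :
--     if a[0][0] <= p[0] <= a[1][0] and a[0][1]<= p[1] <= a[1][1] :
--         return True
--     return False
--
-- def InUnion(a,l) :
--     a1 = a[0]
--     a2 = (a[1][0],a[0][1])
--     a3 = a[1]
--     a4 = (a[0][0],a[1][1])
--     c1,c2,c3,c4 = False,False,False,False
--     for i in range(len(l)) :
--         if pointIn(a1,l[i]):
--             c1 = True
--         if pointIn(a2,l[i]) :
--             c2 = True
--         if pointIn(a3,l[i]) :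
--             c3 = True
--         if pointIn(a4,l[i]) :
--             c4 = True
--     if c1 and c2 and c3 and c4 :
--         return True
--     return False
-- ===== SOURCE B (Python) =====
-- def pointIn(p, a):
--     if a[0][0] <= p[0] <= a[1][0] and a[0][1] <= p[1] <= a[1][1]:
--         return True
--     return False
--
-- def uncoveredEmpty(cs, rects):
--     # worklist: drop corners as soon as some rectangle covers them;
--     # True as soon as the worklist is empty, False if rectangles run out first
--     if not cs:
--         return True
--     if not rects:
--         return False
--     r = rects[0]
--     return uncoveredEmpty([p for p in cs if not pointIn(p, r)], rects[1:])
--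
-- def InUnion(a, l):
--     corners = [a[0], (a[1][0], a[0][1]), a[1], (a[0][0], a[1][1])]
--     return uncoveredEmpty(corners, l)
-- ===== Notes on version B (the rewrite author's own statement) =====
-- stated objective: alternative
-- what changed: B replaces the four boolean flags with a shrinking worklist of still-uncovered corners: each rectangle filters out the corners it contains, recursion stops early with True once the worklist is empty and returns False if rectangles run out first.
import Mathlib
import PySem

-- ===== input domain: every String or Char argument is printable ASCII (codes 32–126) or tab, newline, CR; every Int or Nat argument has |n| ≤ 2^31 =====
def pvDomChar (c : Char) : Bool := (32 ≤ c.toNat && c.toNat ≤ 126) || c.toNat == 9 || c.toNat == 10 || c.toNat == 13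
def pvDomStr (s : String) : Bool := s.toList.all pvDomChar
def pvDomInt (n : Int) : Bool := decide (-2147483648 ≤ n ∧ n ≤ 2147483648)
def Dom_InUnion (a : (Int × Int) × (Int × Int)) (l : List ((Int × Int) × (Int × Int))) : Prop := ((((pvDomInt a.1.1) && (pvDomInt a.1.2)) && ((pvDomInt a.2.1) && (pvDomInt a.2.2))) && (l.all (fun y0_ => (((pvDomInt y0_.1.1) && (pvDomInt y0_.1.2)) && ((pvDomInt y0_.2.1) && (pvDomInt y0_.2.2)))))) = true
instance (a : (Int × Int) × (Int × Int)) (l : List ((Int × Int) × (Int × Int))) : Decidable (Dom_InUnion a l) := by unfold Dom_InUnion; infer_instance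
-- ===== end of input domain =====

-- B replaces A's four-flag pass by a shrinking worklist of still-uncovered corners (filter per rectangle, early stop when empty); same O(n) cost, different mechanism.

-- ===== PORT A =====
def pointIn (p : Int × Int) (a : (Int × Int) × (Int × Int)) : Bool :=
  if a.1.1 ≤ p.1 ∧ p.1 ≤ a.2.1 ∧ a.1.2 ≤ p.2 ∧ p.2 ≤ a.2.2 then true else false

def InUnion (a : (Int × Int) × (Int × Int)) (l : List ((Int × Int) × (Int × Int))) : Bool :=
  let a1 := a.1
  let a2 := (a.2.1, a.1.2)
  let a3 := a.2
  let a4 := (a.1.1, a.2.2)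
  let s := l.foldl (fun (c : Bool × Bool × Bool × Bool) r =>
    (if pointIn a1 r then true else c.1,
     if pointIn a2 r then true else c.2.1,
     if pointIn a3 r then true else c.2.2.1,
     if pointIn a4 r then true else c.2.2.2)) (false, false, false, false)
  if s.1 ∧ s.2.1 ∧ s.2.2.1 ∧ s.2.2.2 then true else false

-- ===== PORT B =====
def uncoveredEmpty : List (Int × Int) → List ((Int × Int) × (Int × Int)) → Bool
  | [], _ => true
  | _, [] => false
  | cs, r :: t => uncoveredEmpty (cs.filter (fun p => !pointIn p r)) t

def InUnion_alt (a : (Int × Int) × (Int × Int)) (l : List ((Int × Int) × (Int × Int))) : Bool :=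
  let corners := [a.1, (a.2.1, a.1.2), a.2, (a.1.1, a.2.2)]
  uncoveredEmpty corners l

-- ===== PRECONDITION & SPEC =====
def Spec_InUnion (a : (Int × Int) × (Int × Int)) (l : List ((Int × Int) × (Int × Int))) (out : Bool) : Prop := out = InUnion_alt a l
instance (a : (Int × Int) × (Int × Int)) (l : List ((Int × Int) × (Int × Int))) (out : Bool) : Decidable (Spec_InUnion a l out) := by unfold Spec_InUnion; infer_instance

-- ===== CLAIM (what is proved, stated in full; the proofs are below) =====
def Claim_equal_InUnion : Prop := ∀ (a : (Int × Int) × (Int × Int)) (l : List ((Int × Int) × (Int × Int))), Dom_InUnion a l → Spec_InUnion a l (InUnion a l)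

-- ===== LEMMAS AND PROOFS =====
theorem InUnion_loop (a1 a2 a3 a4 : Int × Int) (l : List ((Int × Int) × (Int × Int)))
    (c1 c2 c3 c4 : Bool) :
    l.foldl (fun (c : Bool × Bool × Bool × Bool) r =>
      (if pointIn a1 r then true else c.1,
       if pointIn a2 r then true else c.2.1,
       if pointIn a3 r then true else c.2.2.1,
       if pointIn a4 r then true else c.2.2.2)) (c1, c2, c3, c4)
    = (c1 || l.any (fun r => pointIn a1 r),
       c2 || l.any (fun r => pointIn a2 r),
       c3 || l.any (fun r => pointIn a3 r),
       c4 || l.any (fun r => pointIn a4 r)) := by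
  induction l generalizing c1 c2 c3 c4 with
  | nil => simp
  | cons h t ih =>
      simp only [List.foldl_cons, List.any_cons, ih]
      by_cases h1 : pointIn a1 h <;> by_cases h2 : pointIn a2 h <;>
        by_cases h3 : pointIn a3 h <;> by_cases h4 : pointIn a4 h <;>
        simp [h1, h2, h3, h4]

theorem filter_all_cover (r : (Int × Int) × (Int × Int))
    (t : List ((Int × Int) × (Int × Int))) (cs : List (Int × Int)) :
    (cs.filter (fun p => !pointIn p r)).all (fun p => t.any (fun r' => pointIn p r'))
      = cs.all (fun p => pointIn p r || t.any (fun r' => pointIn p r')) := by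
  induction cs with
  | nil => simp
  | cons c cs ih =>
      by_cases h : pointIn c r <;> simp [List.filter_cons, h, ih]

theorem uncoveredEmpty_eq_all (l : List ((Int × Int) × (Int × Int))) (cs : List (Int × Int)) :
    uncoveredEmpty cs l = cs.all (fun p => l.any (fun r => pointIn p r)) := by
  induction l generalizing cs with
  | nil =>
      cases cs with
      | nil => simp [uncoveredEmpty]
      | cons c cs' => simp [uncoveredEmpty]
  | cons r t ih =>
      cases cs with
      | nil => simp [uncoveredEmpty]
      | cons c cs' =>
          rw [show uncoveredEmpty (c :: cs') (r :: t)
                = uncoveredEmpty ((c :: cs').filter (fun p => !pointIn p r)) t from rfl, ih]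
          rw [filter_all_cover]
          simp [List.any_cons]

-- ===== VERDICT (by name: the statement is the Claim_ definition above) =====
theorem InUnion_spec : Claim_equal_InUnion := by
  intro a l _
  unfold Spec_InUnion InUnion InUnion_alt
  simp only [InUnion_loop, uncoveredEmpty_eq_all]
  simp [List.all_cons]
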